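-- pv_equiv track=rewrite | github.com/zaptot/Algorithms-1 | workers/Workers.py | getUnworkedMan
-- ===== SOURCE A (Python) =====
-- suggest = 1
--
-- accept = 2
--
-- def getUnworkedMan(worked):
--     unworked = None
--     for manIndex in range(len(worked)):
--         if suggest not in worked[manIndex] and accept not in worked[manIndex]:
--             return manIndex
--         if accept not in worked[manIndex] and unworked is None:
--             unworked = manIndex
--     return unworked
-- ===== SOURCE B (Python) =====
-- suggest = 1
--
-- accept = 2
--
-- def getUnworkedMan(worked):
--     # Pre-filter: the accept-free rows with their indices; a fully-unworked row
--     # is necessarily among them, so one scan of this filtered list suffices,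
--     # with its head as the fallback.
--     free = [(i, w) for i, w in enumerate(worked) if accept not in w]
--     for i, w in free:
--         if suggest not in w:
--             return i
--     return free[0][0] if free else None
-- ===== Notes on version B (the rewrite author's own statement) =====
-- stated objective: simpler
-- what changed: Replaces A's single stateful pass with an interleaved early return and fallback accumulator by first building the filtered list of accept-free (index,row) pairs, then scanning only that list for a suggest-free row, falling back to its head.
import Mathlib
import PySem

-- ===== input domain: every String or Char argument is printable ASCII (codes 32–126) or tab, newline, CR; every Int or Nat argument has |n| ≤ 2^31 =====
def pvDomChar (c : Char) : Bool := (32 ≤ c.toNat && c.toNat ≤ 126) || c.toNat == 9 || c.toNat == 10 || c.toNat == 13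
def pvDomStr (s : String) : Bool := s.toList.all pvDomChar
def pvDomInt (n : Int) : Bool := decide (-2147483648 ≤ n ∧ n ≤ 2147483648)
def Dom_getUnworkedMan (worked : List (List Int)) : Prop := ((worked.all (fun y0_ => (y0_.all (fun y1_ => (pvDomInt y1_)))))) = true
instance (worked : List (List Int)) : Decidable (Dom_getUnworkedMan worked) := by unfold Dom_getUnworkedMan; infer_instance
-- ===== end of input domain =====

-- B replaces A's single stateful pass (early return interleaved with a fallback
-- accumulator) by a filter building the accept-free (index,row) pairs followed by
-- one scan of that filtered list, its head being the fallback; objective: simpler.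

-- ===== PORT A =====
-- A's loop over range(len(worked)) with the early return and the `unworked`
-- accumulator, as structural recursion carrying the current index and accumulator.
def getUnworkedManLoop (ws : List (List Int)) (i : Int) (unworked : Option Int) : Option Int :=
  match ws with
  | [] => unworked
  | w :: rest =>
    if ¬ (1 : Int) ∈ w ∧ ¬ (2 : Int) ∈ w then some i
    else
      getUnworkedManLoop rest (i + 1)
        (if ¬ (2 : Int) ∈ w ∧ unworked = none then some i else unworked)

def getUnworkedMan (worked : List (List Int)) : Option Int :=
  getUnworkedManLoop worked 0 none

-- ===== PORT B =====
-- the filtered list [(i, w) for i, w in enumerate(worked) if accept not in w]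
def freeRows (ws : List (List Int)) (i : Int) : List (Int × List Int) :=
  match ws with
  | [] => []
  | w :: rest =>
    if ¬ (2 : Int) ∈ w then (i, w) :: freeRows rest (i + 1) else freeRows rest (i + 1)

-- the `for i, w in free` scan returning on the first suggest-free row
def scanFree (free : List (Int × List Int)) : Option Int :=
  match free with
  | [] => none
  | (i, w) :: rest => if ¬ (1 : Int) ∈ w then some i else scanFree rest

def getUnworkedMan_alt (worked : List (List Int)) : Option Int :=
  let free := freeRows worked 0
  match scanFree free with
  | some i => some i
  | none => free.head?.map Prod.fst   -- free[0][0] if free else None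

-- ===== PRECONDITION & SPEC =====
def Spec_getUnworkedMan (worked : List (List Int)) (out : Option Int) : Prop := out = getUnworkedMan_alt worked
instance (worked : List (List Int)) (out : Option Int) : Decidable (Spec_getUnworkedMan worked out) := by unfold Spec_getUnworkedMan; infer_instance

-- ===== CLAIM (what is proved, stated in full; the proofs are below) =====
def Claim_equal_getUnworkedMan : Prop := ∀ (worked : List (List Int)), Dom_getUnworkedMan worked → Spec_getUnworkedMan worked (getUnworkedMan worked)

-- ===== LEMMAS AND PROOFS =====

-- Invariant of A's loop: it returns the first suggest-free index among the
-- accept-free rows if one exists, otherwise the accumulator if already set,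
-- otherwise the first accept-free index.
theorem getUnworkedManLoop_eq (ws : List (List Int)) (i : Int) (acc : Option Int) :
    getUnworkedManLoop ws i acc =
      match scanFree (freeRows ws i) with
      | some j => some j
      | none => acc.or ((freeRows ws i).head?.map Prod.fst) := by
  induction ws generalizing i acc with
  | nil => simp [getUnworkedManLoop, freeRows, scanFree]
  | cons w rest ih =>
    by_cases h2 : ¬ (2 : Int) ∈ w
    · by_cases h1 : ¬ (1 : Int) ∈ w
      · simp [getUnworkedManLoop, freeRows, scanFree, h1, h2]
      · have hna : ¬ (¬ (1 : Int) ∈ w ∧ ¬ (2 : Int) ∈ w) := by tauto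
        simp only [getUnworkedManLoop, freeRows, scanFree, if_pos h2, if_neg hna, if_neg h1, ih]
        cases acc with
        | none => simp [h2]
        | some k => simp
    · have hna : ¬ (¬ (1 : Int) ∈ w ∧ ¬ (2 : Int) ∈ w) := by tauto
      have hacc : ¬ (¬ (2 : Int) ∈ w ∧ acc = none) := by tauto
      simp only [getUnworkedManLoop, freeRows, if_neg hna, if_neg h2, if_neg hacc, ih]

-- ===== VERDICT (by name: the statement is the Claim_ definition above) =====
theorem getUnworkedMan_spec : Claim_equal_getUnworkedMan := by
  intro worked _
  unfold Spec_getUnworkedMan getUnworkedMan getUnworkedMan_alt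
  rw [getUnworkedManLoop_eq]
  cases h : scanFree (freeRows worked 0) <;> simp [h]
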